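-- pv_equiv track=rewrite | github.com/bartoszgebarowski/inventory-management | app/validation.py | check_keys_for_duplicates
-- ===== SOURCE A (Python) =====
-- def check_keys_for_duplicates(keys_candidate: list) -> bool:
--     """
--     Functions that will check if data sorting keys are unique
--     """
--     compare_keys = []
--     for key in keys_candidate:
--         compare_keys.append(key.lower())
--
--     if len(compare_keys) == len(set(compare_keys)) and len(compare_keys) >= 1:
--         return True
--     else:
--         return False
-- ===== SOURCE B (Python) =====
-- def check_keys_for_duplicates(keys_candidate: list) -> bool:
--     lowered = [key.lower() for key in keys_candidate]
--     s = sorted(lowered)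
--     has_dup = any(x == y for x, y in zip(s, s[1:]))
--     return len(lowered) >= 1 and not has_dup
-- ===== Notes on version B (the rewrite author's own statement) =====
-- stated objective: alternative
-- what changed: Duplicate detection by sorting the lowercased keys and scanning adjacent pairs, instead of comparing the list length with the cardinality of a set built from it.
import Mathlib
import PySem

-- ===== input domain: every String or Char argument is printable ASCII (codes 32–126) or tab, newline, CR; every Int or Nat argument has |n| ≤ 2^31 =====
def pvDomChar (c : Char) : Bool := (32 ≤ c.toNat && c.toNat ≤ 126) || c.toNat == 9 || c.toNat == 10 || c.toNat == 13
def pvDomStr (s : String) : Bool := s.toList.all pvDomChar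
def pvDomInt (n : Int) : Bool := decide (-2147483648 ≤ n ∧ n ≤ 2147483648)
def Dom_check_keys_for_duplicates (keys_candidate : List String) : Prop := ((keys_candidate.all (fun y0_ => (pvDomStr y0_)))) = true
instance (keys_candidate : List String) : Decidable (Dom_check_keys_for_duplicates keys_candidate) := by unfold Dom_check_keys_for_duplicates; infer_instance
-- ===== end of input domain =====

-- B is an alternative algorithm: it detects duplicates by sorting the lowercased keys and
-- scanning adjacent pairs, instead of A's set-cardinality comparison; same result everywhere.

-- ===== PORT A =====
-- compare_keys = []; for key in keys_candidate: compare_keys.append(key.lower())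
-- if len(compare_keys) == len(set(compare_keys)) and len(compare_keys) >= 1: return True else: return False
def check_keys_for_duplicates (keys_candidate : List String) : Bool :=
  let compare_keys := keys_candidate.foldl (fun acc key => acc ++ [PySem.Str.lower key]) []
  if compare_keys.length = (PySem.Set.ofList compare_keys).length ∧ 1 ≤ compare_keys.length then
    true
  else
    false

-- ===== PORT B =====
-- lowered = [key.lower() for key in keys_candidate]; s = sorted(lowered)
-- has_dup = any(x == y for x, y in zip(s, s[1:])); return len(lowered) >= 1 and not has_dup
def check_keys_for_duplicates_alt (keys_candidate : List String) : Bool :=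
  let lowered := keys_candidate.map PySem.Str.lower
  let s := PySem.List.sorted lowered (fun x => x) false
  let has_dup := (s.zip (PySem.List.slice s (some 1) none)).any (fun p => p.1 == p.2)
  decide (1 ≤ lowered.length) && !has_dup

-- ===== PRECONDITION & SPEC =====
def Spec_check_keys_for_duplicates (keys_candidate : List String) (out : Bool) : Prop := out = check_keys_for_duplicates_alt keys_candidate
instance (keys_candidate : List String) (out : Bool) : Decidable (Spec_check_keys_for_duplicates keys_candidate out) := by unfold Spec_check_keys_for_duplicates; infer_instance

-- ===== CLAIM (what is proved, stated in full; the proofs are below) =====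
def Claim_equal_check_keys_for_duplicates : Prop := ∀ (keys_candidate : List String), Dom_check_keys_for_duplicates keys_candidate → Spec_check_keys_for_duplicates keys_candidate (check_keys_for_duplicates keys_candidate)

-- ===== LEMMAS AND PROOFS =====

-- A's append loop builds the same list as B's map.
theorem pv_foldl_append_map (f : String → String) :
    ∀ (xs : List String) (acc : List String),
      xs.foldl (fun a k => a ++ [f k]) acc = acc ++ xs.map f := by
  intro xs
  induction xs with
  | nil => intro acc; simp
  | cons x t ih => intro acc; simp [List.foldl, ih]

theorem pv_length_add_le {α : Type} [DecidableEq α] (s : List α) (x : α) :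
    (PySem.Set.add s x).length ≤ s.length + 1 := by
  simp [PySem.Set.add]
  split <;> simp

theorem pv_length_foldl_add_le {α : Type} [DecidableEq α] :
    ∀ (xs : List α) (acc : List α),
      (xs.foldl PySem.Set.add acc).length ≤ acc.length + xs.length := by
  intro xs
  induction xs with
  | nil => intro acc; simp
  | cons x t ih =>
    intro acc
    calc ((x :: t).foldl PySem.Set.add acc).length
        ≤ (PySem.Set.add acc x).length + t.length := ih _
      _ ≤ acc.length + 1 + t.length := by
          have := pv_length_add_le acc x; omega
      _ = acc.length + (x :: t).length := by simp; omega

theorem pv_length_foldl_add_lt_of_mem {α : Type} [DecidableEq α] :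
    ∀ (xs : List α) (acc : List α) (a : α), a ∈ acc → a ∈ xs →
      (xs.foldl PySem.Set.add acc).length < acc.length + xs.length := by
  intro xs
  induction xs with
  | nil => intro acc a _ h; simp at h
  | cons x t ih =>
    intro acc a hacc hx
    rcases List.mem_cons.mp hx with rfl | hmem
    · -- add acc a = acc since a ∈ acc
      have hc : PySem.Set.add acc a = acc := by
        simp [PySem.Set.add]; exact hacc
      have := pv_length_foldl_add_le t acc
      simp only [List.foldl, hc]
      simp
      omega
    · have h1 : a ∈ PySem.Set.add acc x := by rw [PySem.Set.mem_add]; exact Or.inl hacc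
      have h2 := ih (PySem.Set.add acc x) a h1 hmem
      have h3 := pv_length_add_le acc x
      simp only [List.foldl]
      simp at h2 ⊢
      omega

theorem pv_length_foldl_add_lt_of_not_nodup {α : Type} [DecidableEq α] :
    ∀ (xs : List α) (acc : List α), ¬ xs.Nodup →
      (xs.foldl PySem.Set.add acc).length < acc.length + xs.length := by
  intro xs
  induction xs with
  | nil => intro acc h; exact absurd List.nodup_nil h
  | cons x t ih =>
    intro acc h
    rw [List.nodup_cons] at h
    push Not at h
    by_cases hx : x ∈ t
    · have h1 : x ∈ PySem.Set.add acc x := by rw [PySem.Set.mem_add]; exact Or.inr rfl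
      have h2 := pv_length_foldl_add_lt_of_mem t (PySem.Set.add acc x) x h1 hx
      have h3 := pv_length_add_le acc x
      simp only [List.foldl]
      simp at h2 ⊢
      omega
    · have hnd := h hx
      have h2 := ih (PySem.Set.add acc x) hnd
      have h3 := pv_length_add_le acc x
      simp only [List.foldl]
      simp at h2 ⊢
      omega

-- A's test: the set has the same size as the list iff the list has no duplicates.
theorem pv_ofList_length_iff_nodup {α : Type} [DecidableEq α] (xs : List α) :
    xs.length = (PySem.Set.ofList xs).length ↔ xs.Nodup := by
  constructor
  · intro h
    by_contra hnd
    have := pv_length_foldl_add_lt_of_not_nodup xs [] hnd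
    rw [PySem.Set.ofList_eq_foldl] at h
    simp at this
    omega
  · intro h
    rw [PySem.Set.ofList_eq_self_of_nodup xs h]

-- B's adjacent scan: on a ≤-sorted list it reports false exactly when the list is strictly increasing.
theorem pv_scan_iff_pairwise_lt :
    ∀ (s : List String), s.Pairwise (· ≤ ·) →
      (((s.zip s.tail).any (fun p => p.1 == p.2) = false) ↔ s.Pairwise (· < ·)) := by
  intro s
  induction s with
  | nil => intro _; simp
  | cons a t ih =>
    intro hp
    rw [List.pairwise_cons] at hp
    cases t with
    | nil => simp
    | cons b u =>
      have iht := ih hp.2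
      simp only [List.tail_cons, List.zip_cons_cons, List.any_cons, Bool.or_eq_false_iff,
        beq_eq_false_iff_ne]
      constructor
      · intro ⟨hne, hrest⟩
        have htail : (b :: u).Pairwise (· < ·) := iht.mp (by simpa using hrest)
        have hab : a < b := lt_of_le_of_ne (hp.1 b List.mem_cons_self) hne
        rw [List.pairwise_cons]
        refine ⟨?_, htail⟩
        intro x hx
        rcases List.mem_cons.mp hx with rfl | hxu
        · exact hab
        · exact lt_trans hab ((List.pairwise_cons.mp htail).1 x hxu)
      · intro h
        rw [List.pairwise_cons] at h
        refine ⟨ne_of_lt (h.1 b List.mem_cons_self), ?_⟩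
        simpa using iht.mpr h.2

theorem pv_nodup_iff_scan (s : List String) (hp : s.Pairwise (· ≤ ·)) :
    s.Nodup ↔ ((s.zip s.tail).any (fun p => p.1 == p.2) = false) := by
  rw [pv_scan_iff_pairwise_lt s hp]
  constructor
  · intro h
    exact (List.Pairwise.and hp h).imp (fun hq => lt_of_le_of_ne hq.1 hq.2)
  · intro h
    exact h.imp (fun hlt => ne_of_lt hlt)

-- ===== VERDICT (by name: the statement is the Claim_ definition above) =====
theorem check_keys_for_duplicates_spec : Claim_equal_check_keys_for_duplicates := by
  intro keys _
  unfold Spec_check_keys_for_duplicates check_keys_for_duplicates check_keys_for_duplicates_alt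
  rw [pv_foldl_append_map]
  simp only [List.nil_append]
  set L := keys.map PySem.Str.lower with hL
  set s := PySem.List.sorted L (fun x => x) false with hs
  have hperm : s.Perm L := PySem.List.sorted_perm L (fun x => x) false
  have hlen : s.length = L.length := hperm.length_eq
  have hpair : s.Pairwise (· ≤ ·) := by
    have := PySem.List.sorted_pairwise L (fun x => x)
    simpa using this
  rw [PySem.List.slice_from_one]
  have hiff : (L.length = (PySem.Set.ofList L).length) ↔
      ((s.zip s.tail).any (fun p => p.1 == p.2) = false) := by
    rw [pv_ofList_length_iff_nodup, ← hperm.nodup_iff, pv_nodup_iff_scan s hpair]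
  by_cases h1 : 1 ≤ L.length
  · by_cases h2 : L.length = (PySem.Set.ofList L).length
    · rw [if_pos ⟨h2, h1⟩]
      have := hiff.mp h2
      simp [this, h1]
    · rw [if_neg (by tauto)]
      have : ¬ ((s.zip s.tail).any (fun p => p.1 == p.2) = false) := fun h => h2 (hiff.mpr h)
      simp only [Bool.not_eq_false] at this
      simp [this]
  · rw [if_neg (by tauto)]
    simp [h1]
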